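-- pv_equiv track=rewrite | github.com/zakvan2022/Betasmartz | main/tax_helpers.py | get_sum_expenses
-- ===== SOURCE A (Python) =====
-- def get_sum_expenses(expenses):
--     '''
--     returns sum of expenses
--     '''
--     sum_expenses = 0
--     if expenses is not None:
--         for exp in expenses:
--             if exp['amt'] < 0:
--                 raise Exception("exp['amt'] < 0")
--             else:
--                 sum_expenses = sum_expenses + exp['amt']
--     return sum_expenses
-- ===== SOURCE B (Python) =====
-- def _dc_total(es):
--     # divide-and-conquer pairwise summation; validates at the leaves
--     if not es:
--         return 0
--     if len(es) == 1:
--         amt = es[0]['amt']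
--         if amt < 0:
--             raise Exception("exp['amt'] < 0")
--         return amt
--     mid = len(es) // 2
--     return _dc_total(es[:mid]) + _dc_total(es[mid:])
--
-- def get_sum_expenses(expenses):
--     '''
--     returns sum of expenses
--     '''
--     if expenses is None:
--         return 0
--     return _dc_total(list(expenses))
-- ===== Notes on version B (the rewrite author's own statement) =====
-- stated objective: alternative
-- what changed: Replaces A's left-to-right accumulate-and-check loop with a divide-and-conquer pairwise summation that recursively splits the list in halves and validates each amount at the leaves.
import Mathlib
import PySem

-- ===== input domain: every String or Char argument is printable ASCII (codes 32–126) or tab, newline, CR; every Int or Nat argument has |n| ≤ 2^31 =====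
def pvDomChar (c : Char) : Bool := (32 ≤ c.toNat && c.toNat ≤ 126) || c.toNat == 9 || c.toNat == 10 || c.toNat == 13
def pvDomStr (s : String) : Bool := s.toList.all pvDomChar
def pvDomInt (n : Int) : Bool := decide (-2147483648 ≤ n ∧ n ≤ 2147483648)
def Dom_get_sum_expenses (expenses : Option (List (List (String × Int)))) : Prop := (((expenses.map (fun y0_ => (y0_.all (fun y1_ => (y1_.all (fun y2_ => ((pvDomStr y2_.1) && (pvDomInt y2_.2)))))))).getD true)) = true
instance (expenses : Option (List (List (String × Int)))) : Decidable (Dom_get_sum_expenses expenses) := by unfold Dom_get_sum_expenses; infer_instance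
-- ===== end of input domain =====

-- B replaces A's left-to-right accumulate-and-check loop with divide-and-conquer
-- pairwise summation (split in halves, validate at the leaves); same values on Pre_.
-- dict lookup exp['amt']: first match in the association list.
def pvAmt? (e : List (String × Int)) : Option Int := (e.find? (fun p => p.1 == "amt")).map (·.2)

-- ===== PORT A =====
def get_sum_expenses (expenses : Option (List (List (String × Int)))) : Int :=
  match expenses with
  | none => 0
  | some es => es.foldl (fun s e => s + (pvAmt? e).getD 0) 0

-- ===== PORT B =====
-- _dc_total from Source B; the raise branch lies outside Pre_ (leaf returns the amount).
def dcTotal : List (List (String × Int)) → Int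
  | [] => 0
  | [e] => (pvAmt? e).getD 0
  | a :: b :: t =>
    dcTotal ((a :: b :: t).take ((a :: b :: t).length / 2)) +
    dcTotal ((a :: b :: t).drop ((a :: b :: t).length / 2))
termination_by es => es.length
decreasing_by
  · simp; omega
  · simp; omega

def get_sum_expenses_alt (expenses : Option (List (List (String × Int)))) : Int :=
  match expenses with
  | none => 0
  | some es => dcTotal es

-- ===== PRECONDITION & SPEC =====
-- Pre_ excludes exactly the inputs on which A raises (it returns no value there): a dict
-- without an 'amt' key (KeyError) or with a negative amount (explicit Exception).
def Pre_get_sum_expenses (expenses : Option (List (List (String × Int)))) : Prop :=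
  ∀ es ∈ expenses, ∀ e ∈ es, 0 ≤ ((pvAmt? e).getD (-1))
instance (expenses : Option (List (List (String × Int)))) : Decidable (Pre_get_sum_expenses expenses) := by unfold Pre_get_sum_expenses; infer_instance
def pvWitness_get_sum_expenses : (Option (List (List (String × Int)))) := some [[("amt", 3)], [("amt", 0), ("x", 1)]]

def Spec_get_sum_expenses (expenses : Option (List (List (String × Int)))) (out : Int) : Prop := out = get_sum_expenses_alt expenses
instance (expenses : Option (List (List (String × Int)))) (out : Int) : Decidable (Spec_get_sum_expenses expenses out) := by unfold Spec_get_sum_expenses; infer_instance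

-- ===== CLAIM (what is proved, stated in full; the proofs are below) =====
def Claim_equal_get_sum_expenses : Prop := ∀ (expenses : Option (List (List (String × Int)))), Dom_get_sum_expenses expenses → Pre_get_sum_expenses expenses → Spec_get_sum_expenses expenses (get_sum_expenses expenses)

-- ===== LEMMAS AND PROOFS =====
theorem pv_foldl_add_eq_sum (f : List (String × Int) → Int) :
    ∀ (l : List (List (String × Int))) (s : Int), l.foldl (fun s e => s + f e) s = s + (l.map f).sum := by
  intro l
  induction l with
  | nil => simp
  | cons h t ih => intro s; simp [List.foldl, ih]; ring

theorem dcTotal_eq_sum : ∀ (es : List (List (String × Int))),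
    dcTotal es = (es.map (fun e => (pvAmt? e).getD 0)).sum := by
  intro es
  fun_induction dcTotal es with
  | case1 => simp
  | case2 e => simp
  | case3 a b t ih1 ih2 =>
    rw [ih1, ih2, ← List.sum_append, ← List.map_append, List.take_append_drop]

-- ===== VERDICT (by name: the statement is the Claim_ definition above) =====
theorem get_sum_expenses_spec : Claim_equal_get_sum_expenses := by
  intro expenses _ _
  unfold Spec_get_sum_expenses get_sum_expenses get_sum_expenses_alt
  match expenses with
  | none => rfl
  | some es =>
    simp only [dcTotal_eq_sum]
    simpa using pv_foldl_add_eq_sum (fun e => (pvAmt? e).getD 0) es 0
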